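-- pv_equiv track=rewrite | github.com/anandprakash-web/kiwimath | backend/scripts/content_enhancer.py | detect_topic_from_tags
-- ===== SOURCE A (Python) =====
-- COUNTING_TAGS = {
--     "counting", "count", "observation", "tally-charts", "tally",
--     "count-objects", "how-many", "number-counting",
-- }
--
-- def detect_topic_from_tags(tags):
--     """Infer the broad topic category from question tags."""
--     if not tags:
--         return "general"
--     tag_set = set(t.lower() for t in tags)
--     if tag_set & {"addition", "subtraction", "multiplication", "division",
--                   "add", "subtract", "multiply", "divide", "arithmetic",
--                   "missing-number"}:
--         return "arithmetic"
--     if tag_set & COUNTING_TAGS: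
--         return "counting"
--     if tag_set & {"pattern", "patterns", "sequence", "series",
--                   "number-pattern", "growing-pattern"}:
--         return "patterns"
--     if tag_set & {"shape", "shapes", "geometry", "polygon", "circle",
--                   "triangle", "rectangle", "square", "3d-shapes"}:
--         return "shapes"
--     if tag_set & {"logic", "comparison", "ordering", "classify",
--                   "odd-one-out", "sorting"}:
--         return "logic"
--     if tag_set & {"spatial", "direction", "left-right", "symmetry",
--                   "reflection", "rotation", "position"}:
--         return "spatial"
--     if tag_set & {"word_problem", "word-problem", "story", "real-world"}:
--         return "word_problems"
--     if tag_set & {"puzzle", "riddle", "brain-teaser", "sudoku"}: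
--         return "puzzles"
--     return "general"
-- ===== SOURCE B (Python) =====
-- # Inverted traversal: one tag->rank index table, single pass over tags keeping the smallest rank.
--
-- CATEGORIES = ["arithmetic", "counting", "patterns", "shapes", "logic",
--               "spatial", "word_problems", "puzzles"]
--
-- _CATEGORY_TAGS = [
--     ["addition", "subtraction", "multiplication", "division",
--      "add", "subtract", "multiply", "divide", "arithmetic", "missing-number"],
--     ["counting", "count", "observation", "tally-charts", "tally",
--      "count-objects", "how-many", "number-counting"],
--     ["pattern", "patterns", "sequence", "series",
--      "number-pattern", "growing-pattern"],
--     ["shape", "shapes", "geometry", "polygon", "circle",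
--      "triangle", "rectangle", "square", "3d-shapes"],
--     ["logic", "comparison", "ordering", "classify",
--      "odd-one-out", "sorting"],
--     ["spatial", "direction", "left-right", "symmetry",
--      "reflection", "rotation", "position"],
--     ["word_problem", "word-problem", "story", "real-world"],
--     ["puzzle", "riddle", "brain-teaser", "sudoku"],
-- ]
--
-- TAG_TO_CAT = {t: i for i, ts in enumerate(_CATEGORY_TAGS) for t in ts}
--
--
-- def detect_topic_from_tags(tags):
--     """Infer the broad topic category from question tags."""
--     if not tags:
--         return "general"
--     best = None
--     for t in tags:
--         r = TAG_TO_CAT.get(t.lower())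
--         if r is not None and (best is None or r < best):
--             best = r
--     return "general" if best is None else CATEGORIES[best]
-- ===== Notes on version B (the rewrite author's own statement) =====
-- stated objective: simpler
-- what changed: Replaces the eight set-intersection tests traversed per category with one tag->rank lookup table and a single pass over the tags keeping the minimum rank.
import Mathlib
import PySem

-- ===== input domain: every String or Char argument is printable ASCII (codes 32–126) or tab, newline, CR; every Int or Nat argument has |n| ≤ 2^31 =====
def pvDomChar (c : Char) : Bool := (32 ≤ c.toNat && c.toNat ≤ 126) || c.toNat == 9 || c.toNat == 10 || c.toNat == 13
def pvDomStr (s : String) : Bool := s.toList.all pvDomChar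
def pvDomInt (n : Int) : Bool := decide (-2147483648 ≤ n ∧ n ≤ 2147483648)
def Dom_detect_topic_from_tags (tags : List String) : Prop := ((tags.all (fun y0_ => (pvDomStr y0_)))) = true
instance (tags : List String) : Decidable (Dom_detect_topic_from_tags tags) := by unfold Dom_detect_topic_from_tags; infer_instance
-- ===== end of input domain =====

set_option maxRecDepth 100000

-- B replaces A's eight per-category set-intersection tests by a single tag->rank lookup
-- table and one pass over the tags keeping the minimum rank (objective: simpler).

-- ===== PORT A =====
def aS0 : List String := ["addition", "subtraction", "multiplication", "division", "add", "subtract", "multiply", "divide", "arithmetic", "missing-number"]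
def aS1 : List String := ["counting", "count", "observation", "tally-charts", "tally", "count-objects", "how-many", "number-counting"]
def aS2 : List String := ["pattern", "patterns", "sequence", "series", "number-pattern", "growing-pattern"]
def aS3 : List String := ["shape", "shapes", "geometry", "polygon", "circle", "triangle", "rectangle", "square", "3d-shapes"]
def aS4 : List String := ["logic", "comparison", "ordering", "classify", "odd-one-out", "sorting"]
def aS5 : List String := ["spatial", "direction", "left-right", "symmetry", "reflection", "rotation", "position"]
def aS6 : List String := ["word_problem", "word-problem", "story", "real-world"]
def aS7 : List String := ["puzzle", "riddle", "brain-teaser", "sudoku"]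
def COUNTING_TAGS : PySem.Set String := PySem.Set.ofList aS1

def detect_topic_from_tags (tags : List String) : String :=
  if tags = [] then "general"
  else
    let tag_set : PySem.Set String := PySem.Set.ofList (tags.map PySem.Str.lower)
    if PySem.Set.inter tag_set (PySem.Set.ofList aS0) ≠ [] then "arithmetic"
    else if PySem.Set.inter tag_set COUNTING_TAGS ≠ [] then "counting"
    else if PySem.Set.inter tag_set (PySem.Set.ofList aS2) ≠ [] then "patterns"
    else if PySem.Set.inter tag_set (PySem.Set.ofList aS3) ≠ [] then "shapes"
    else if PySem.Set.inter tag_set (PySem.Set.ofList aS4) ≠ [] then "logic"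
    else if PySem.Set.inter tag_set (PySem.Set.ofList aS5) ≠ [] then "spatial"
    else if PySem.Set.inter tag_set (PySem.Set.ofList aS6) ≠ [] then "word_problems"
    else if PySem.Set.inter tag_set (PySem.Set.ofList aS7) ≠ [] then "puzzles"
    else "general"

-- ===== PORT B =====
def CATEGORIES : List String := ["arithmetic", "counting", "patterns", "shapes", "logic", "spatial", "word_problems", "puzzles"]

def CATEGORY_TAGS : List (List String) :=
  [["addition", "subtraction", "multiplication", "division", "add", "subtract", "multiply", "divide", "arithmetic", "missing-number"], ["counting", "count", "observation", "tally-charts", "tally", "count-objects", "how-many", "number-counting"], ["pattern", "patterns", "sequence", "series", "number-pattern", "growing-pattern"], ["shape", "shapes", "geometry", "polygon", "circle", "triangle", "rectangle", "square", "3d-shapes"], ["logic", "comparison", "ordering", "classify", "odd-one-out", "sorting"], ["spatial", "direction", "left-right", "symmetry", "reflection", "rotation", "position"], ["word_problem", "word-problem", "story", "real-world"], ["puzzle", "riddle", "brain-teaser", "sudoku"]]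

-- TAG_TO_CAT = {t: i for i, ts in enumerate(CATEGORY_TAGS) for t in ts}
def TAG_TO_CAT : PySem.Dict String Int :=
  (PySem.List.enumerate CATEGORY_TAGS).foldl
    (fun d p => p.2.foldl (fun d t => d.insert t p.1) d) PySem.Dict.empty

-- loop body: r = TAG_TO_CAT.get(t.lower()); if r is not None and (best is None or r < best): best = r
def bStep (best : Option Int) (t : String) : Option Int :=
  match TAG_TO_CAT.get? (PySem.Str.lower t), best with
  | none, b => b
  | some r, none => some r
  | some r, some b => if r < b then some r else some b

def detect_topic_from_tags_alt (tags : List String) : String :=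
  if tags = [] then "general"
  else
    match tags.foldl bStep none with
    | none => "general"
    | some r => (PySem.List.pyGet? CATEGORIES r).getD "general"
      -- CATEGORIES[best]; 0 <= best < 8 always holds, so the .getD default is never used

-- ===== PRECONDITION & SPEC =====
def Spec_detect_topic_from_tags (tags : List String) (out : String) : Prop := out = detect_topic_from_tags_alt tags
instance (tags : List String) (out : String) : Decidable (Spec_detect_topic_from_tags tags out) := by unfold Spec_detect_topic_from_tags; infer_instance

-- ===== CLAIM (what is proved, stated in full; the proofs are below) =====
def Claim_equal_detect_topic_from_tags : Prop := ∀ (tags : List String), Dom_detect_topic_from_tags tags → Spec_detect_topic_from_tags tags (detect_topic_from_tags tags)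

-- ===== LEMMAS AND PROOFS =====

def SETS : List (List String) := [aS0, aS1, aS2, aS3, aS4, aS5, aS6, aS7]

lemma tagToCat_eq : TAG_TO_CAT = PySem.Dict.mk [("addition", (0 : Int)), ("subtraction", (0 : Int)), ("multiplication", (0 : Int)), ("division", (0 : Int)), ("add", (0 : Int)), ("subtract", (0 : Int)), ("multiply", (0 : Int)), ("divide", (0 : Int)), ("arithmetic", (0 : Int)), ("missing-number", (0 : Int)), ("counting", (1 : Int)), ("count", (1 : Int)), ("observation", (1 : Int)), ("tally-charts", (1 : Int)), ("tally", (1 : Int)), ("count-objects", (1 : Int)), ("how-many", (1 : Int)), ("number-counting", (1 : Int)), ("pattern", (2 : Int)), ("patterns", (2 : Int)), ("sequence", (2 : Int)), ("series", (2 : Int)), ("number-pattern", (2 : Int)), ("growing-pattern", (2 : Int)), ("shape", (3 : Int)), ("shapes", (3 : Int)), ("geometry", (3 : Int)), ("polygon", (3 : Int)), ("circle", (3 : Int)), ("triangle", (3 : Int)), ("rectangle", (3 : Int)), ("square", (3 : Int)), ("3d-shapes", (3 : Int)), ("logic", (4 : Int)), ("comparison", (4 : Int)), ("ordering", (4 :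 Int)), ("classify", (4 : Int)), ("odd-one-out", (4 : Int)), ("sorting", (4 : Int)), ("spatial", (5 : Int)), ("direction", (5 : Int)), ("left-right", (5 : Int)), ("symmetry", (5 : Int)), ("reflection", (5 : Int)), ("rotation", (5 : Int)), ("position", (5 : Int)), ("word_problem", (6 : Int)), ("word-problem", (6 : Int)), ("story", (6 : Int)), ("real-world", (6 : Int)), ("puzzle", (7 : Int)), ("riddle", (7 : Int)), ("brain-teaser", (7 : Int)), ("sudoku", (7 : Int))] := by rfl

lemma get?_iff_pairs (u : String) (i : Int) :
    TAG_TO_CAT.get? u = some i ↔ (u, i) ∈ (PySem.Dict.mk [("addition", (0 : Int)), ("subtraction", (0 : Int)), ("multiplication", (0 : Int)), ("division", (0 : Int)), ("add", (0 : Int)), ("subtract", (0 : Int)), ("multiply", (0 : Int)), ("divide", (0 : Int)), ("arithmetic", (0 : Int)), ("missing-number", (0 : Int)), ("counting", (1 : Int)), ("count", (1 : Int)), ("observation", (1 : Int)), ("tally-charts", (1 : Int)), ("tally", (1 : Int)), ("count-objects", (1 : Int)), ("how-many", (1 : Int)), ("number-counting", (1 : Int)), ("pattern", (2 : Int)), ("patterns",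 (2 : Int)), ("sequence", (2 : Int)), ("series", (2 : Int)), ("number-pattern", (2 : Int)), ("growing-pattern", (2 : Int)), ("shape", (3 : Int)), ("shapes", (3 : Int)), ("geometry", (3 : Int)), ("polygon", (3 : Int)), ("circle", (3 : Int)), ("triangle", (3 : Int)), ("rectangle", (3 : Int)), ("square", (3 : Int)), ("3d-shapes", (3 : Int)), ("logic", (4 : Int)), ("comparison", (4 : Int)), ("ordering", (4 : Int)), ("classify", (4 : Int)), ("odd-one-out", (4 : Int)), ("sorting", (4 : Int)), ("spatial", (5 : Int)), ("direction", (5 : Int)), ("left-right", (5 : Int)), ("symmetry", (5 : Int)), ("reflection", (5 : Int)), ("rotation", (5 : Int)), ("position", (5 : Int)), ("word_problem", (6 : Int)), ("word-problem", (6 : Int)), ("story", (6 : Int)), ("real-world", (6 : Int)), ("puzzle", (7 : Int)), ("riddle", (7 : Int)), ("brain-teaser", (7 : Int)), ("sudoku", (7 : Int))] : PySem.Dict String Int).items := by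
  rw [tagToCat_eq]
  exact PySem.Dict.get?_eq_some_iff_mem_items _ _ _ (by decide)

lemma get?_lt8 (u : String) (i : Int) (h : TAG_TO_CAT.get? u = some i) : 0 ≤ i ∧ i < 8 := by
  rw [get?_iff_pairs] at h
  simp at h
  rcases h with h | h | h | h | h | h | h | h <;> omega

lemma mem_SETS_iff (u : String) (i : Nat) (hi : i < 8) :
    u ∈ SETS.getD i [] ↔ TAG_TO_CAT.get? u = some (i : Int) := by
  rw [get?_iff_pairs]
  interval_cases i <;>
    simp [SETS, aS0, aS1, aS2, aS3, aS4, aS5, aS6, aS7]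

lemma bStep_none (b : Option Int) (t : String) :
    bStep b t = none ↔ b = none ∧ TAG_TO_CAT.get? (PySem.Str.lower t) = none := by
  cases h1 : TAG_TO_CAT.get? (PySem.Str.lower t) <;> cases b <;>
    simp [bStep, h1]
  split_ifs <;> simp

lemma bStep_some_cases (b : Option Int) (t : String) (r : Int) (h : bStep b t = some r) :
    b = some r ∨ TAG_TO_CAT.get? (PySem.Str.lower t) = some r := by
  cases h1 : TAG_TO_CAT.get? (PySem.Str.lower t) with
  | none => exact Or.inl (by simpa [bStep, h1] using h)
  | some v =>
    cases b with
    | none =>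
      have hv : v = r := by simpa [bStep, h1] using h
      exact Or.inr (by rw [hv])
    | some bv =>
      simp only [bStep, h1] at h
      split_ifs at h with hlt
      · have hv : v = r := by simpa using h
        exact Or.inr (by rw [hv])
      · have hv : bv = r := by simpa using h
        exact Or.inl (by rw [hv])

lemma bStep_le_b (b : Option Int) (t : String) (j : Int) (h : b = some j) :
    ∃ j', bStep b t = some j' ∧ j' ≤ j := by
  subst h
  cases h1 : TAG_TO_CAT.get? (PySem.Str.lower t)
  · exact ⟨j, by simp [bStep, h1], le_refl j⟩
  · rename_i v
    by_cases hv : v < j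
    · exact ⟨v, by simp [bStep, h1, hv], by omega⟩
    · exact ⟨j, by simp [bStep, h1, hv], le_refl j⟩

lemma bStep_le_r (b : Option Int) (t : String) (j : Int)
    (h : TAG_TO_CAT.get? (PySem.Str.lower t) = some j) :
    ∃ j', bStep b t = some j' ∧ j' ≤ j := by
  cases b
  · exact ⟨j, by simp [bStep, h], le_refl j⟩
  · rename_i bv
    by_cases hv : j < bv
    · exact ⟨j, by simp [bStep, h, hv], le_refl j⟩
    · exact ⟨bv, by simp [bStep, h, hv], by omega⟩

lemma foldl_none_iff (tags : List String) (b : Option Int) :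
    tags.foldl bStep b = none ↔
      b = none ∧ ∀ t ∈ tags, TAG_TO_CAT.get? (PySem.Str.lower t) = none := by
  induction tags generalizing b with
  | nil => simp
  | cons t ts ih =>
    rw [List.foldl_cons, ih, bStep_none]
    constructor
    · rintro ⟨⟨h1, h2⟩, h3⟩
      refine ⟨h1, ?_⟩
      intro x hx
      rcases List.mem_cons.mp hx with rfl | hx
      · exact h2
      · exact h3 x hx
    · rintro ⟨h1, h2⟩
      exact ⟨⟨h1, h2 t (List.mem_cons_self)⟩, fun x hx => h2 x (List.mem_cons_of_mem t hx)⟩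

lemma foldl_some (tags : List String) (b : Option Int) (r : Int)
    (h : tags.foldl bStep b = some r) :
    (b = some r ∨ ∃ t ∈ tags, TAG_TO_CAT.get? (PySem.Str.lower t) = some r) ∧
    (∀ j, b = some j → r ≤ j) ∧
    (∀ t ∈ tags, ∀ j, TAG_TO_CAT.get? (PySem.Str.lower t) = some j → r ≤ j) := by
  induction tags generalizing b with
  | nil =>
    simp only [List.foldl_nil] at h
    refine ⟨Or.inl h, fun j hj => ?_, by simp⟩
    rw [h] at hj
    injection hj with hj
    omega
  | cons t ts ih =>
    rw [List.foldl_cons] at h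
    obtain ⟨h1, h2, h3⟩ := ih (bStep b t) h
    refine ⟨?_, ?_, ?_⟩
    · rcases h1 with h1 | ⟨x, hx, hgx⟩
      · rcases bStep_some_cases b t r h1 with hb | hρ
        · exact Or.inl hb
        · exact Or.inr ⟨t, List.mem_cons_self, hρ⟩
      · exact Or.inr ⟨x, List.mem_cons_of_mem t hx, hgx⟩
    · intro j hj
      obtain ⟨j', hj', hle⟩ := bStep_le_b b t j hj
      exact le_trans (h2 j' hj') hle
    · intro x hx j hgj
      rcases List.mem_cons.mp hx with rfl | hx
      · obtain ⟨j', hj', hle⟩ := bStep_le_r b x j hgj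
        exact le_trans (h2 j' hj') hle
      · exact h3 x hx j hgj

lemma inter_ofList_eq_nil (L : List String) (T : List String) :
    (PySem.Set.inter (PySem.Set.ofList L) T = []) ↔ ∀ y ∈ L, y ∉ T := by
  rw [List.eq_nil_iff_forall_not_mem]
  constructor
  · intro h y hyL hyT
    exact h y (by rw [PySem.Set.mem_inter]; exact ⟨(PySem.Set.mem_ofList _ _).mpr hyL, hyT⟩)
  · intro h y hy
    rw [PySem.Set.mem_inter] at hy
    exact h y ((PySem.Set.mem_ofList _ _).mp hy.1) hy.2

lemma inter_nil_of_min (tags : List String) (r : Int) (i : Nat) (S : List String)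
    (hi : i < 8) (hS : SETS.getD i [] = S) (hir : (i : Int) < r)
    (hmin : ∀ t ∈ tags, ∀ j, TAG_TO_CAT.get? (PySem.Str.lower t) = some j → r ≤ j) :
    PySem.Set.inter (PySem.Set.ofList (tags.map PySem.Str.lower)) (PySem.Set.ofList S) = [] := by
  rw [inter_ofList_eq_nil]
  intro y hy hyT
  obtain ⟨t, ht, rfl⟩ := List.mem_map.mp hy
  have hm := (PySem.Set.mem_ofList _ _).mp hyT
  rw [← hS] at hm
  have hget := (mem_SETS_iff _ i hi).mp hm
  have := hmin t ht (i : Int) hget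
  omega

lemma inter_nil_of_none (tags : List String) (i : Nat) (S : List String)
    (hi : i < 8) (hS : SETS.getD i [] = S)
    (hall : ∀ t ∈ tags, TAG_TO_CAT.get? (PySem.Str.lower t) = none) :
    PySem.Set.inter (PySem.Set.ofList (tags.map PySem.Str.lower)) (PySem.Set.ofList S) = [] := by
  rw [inter_ofList_eq_nil]
  intro y hy hyT
  obtain ⟨t, ht, rfl⟩ := List.mem_map.mp hy
  have hm := (PySem.Set.mem_ofList _ _).mp hyT
  rw [← hS] at hm
  have hget := (mem_SETS_iff _ i hi).mp hm
  rw [hall t ht] at hget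
  simp at hget

lemma inter_ne_nil_of_hit (tags : List String) (i : Nat) (S : List String)
    (hi : i < 8) (hS : SETS.getD i [] = S)
    (hex : ∃ t ∈ tags, TAG_TO_CAT.get? (PySem.Str.lower t) = some (i : Int)) :
    PySem.Set.inter (PySem.Set.ofList (tags.map PySem.Str.lower)) (PySem.Set.ofList S) ≠ [] := by
  obtain ⟨t, ht, hget⟩ := hex
  intro hnil
  rw [inter_ofList_eq_nil] at hnil
  refine hnil (PySem.Str.lower t) (List.mem_map_of_mem ht) ?_
  rw [PySem.Set.mem_ofList, ← hS]
  exact (mem_SETS_iff _ i hi).mpr hget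

-- ===== VERDICT (by name: the statement is the Claim_ definition above) =====
theorem detect_topic_from_tags_spec : Claim_equal_detect_topic_from_tags := by
  intro tags _
  unfold Spec_detect_topic_from_tags
  by_cases h : tags = []
  · simp [detect_topic_from_tags, detect_topic_from_tags_alt, h]
  · cases hres : tags.foldl bStep none with
    | none =>
      have hall := ((foldl_none_iff tags none).mp hres).2
      have hf0 := inter_nil_of_none tags 0 aS0 (by omega) rfl hall
      have hf1 := inter_nil_of_none tags 1 aS1 (by omega) rfl hall
      have hf2 := inter_nil_of_none tags 2 aS2 (by omega) rfl hall
      have hf3 := inter_nil_of_none tags 3 aS3 (by omega) rfl hall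
      have hf4 := inter_nil_of_none tags 4 aS4 (by omega) rfl hall
      have hf5 := inter_nil_of_none tags 5 aS5 (by omega) rfl hall
      have hf6 := inter_nil_of_none tags 6 aS6 (by omega) rfl hall
      have hf7 := inter_nil_of_none tags 7 aS7 (by omega) rfl hall
      simp [detect_topic_from_tags, detect_topic_from_tags_alt, h, hres, COUNTING_TAGS,
            hf0, hf1, hf2, hf3, hf4, hf5, hf6, hf7]
    | some r =>
      obtain ⟨h1, _, hmin⟩ := foldl_some tags none r hres
      have hex : ∃ t ∈ tags, TAG_TO_CAT.get? (PySem.Str.lower t) = some r :=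
        h1.resolve_left (by simp)
      have hr8 : 0 ≤ r ∧ r < 8 := by
        obtain ⟨t, _, hgt⟩ := hex
        exact get?_lt8 _ _ hgt
      obtain ⟨hr0, hr8⟩ := hr8
      interval_cases r
      · have ht := inter_ne_nil_of_hit tags 0 aS0 (by omega) rfl (by exact_mod_cast hex)
        simp [detect_topic_from_tags, detect_topic_from_tags_alt, h, hres, ht, CATEGORIES, PySem.List.pyGet?]
        rfl
      · have ht := inter_ne_nil_of_hit tags 1 aS1 (by omega) rfl (by exact_mod_cast hex)
        have hf0 := inter_nil_of_min tags 1 0 aS0 (by omega) rfl (by norm_num) hmin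
        simp [detect_topic_from_tags, detect_topic_from_tags_alt, h, hres, COUNTING_TAGS, ht, hf0, CATEGORIES, PySem.List.pyGet?]
        rfl
      · have ht := inter_ne_nil_of_hit tags 2 aS2 (by omega) rfl (by exact_mod_cast hex)
        have hf0 := inter_nil_of_min tags 2 0 aS0 (by omega) rfl (by norm_num) hmin
        have hf1 := inter_nil_of_min tags 2 1 aS1 (by omega) rfl (by norm_num) hmin
        simp [detect_topic_from_tags, detect_topic_from_tags_alt, h, hres, COUNTING_TAGS, ht, hf0, hf1, CATEGORIES, PySem.List.pyGet?]
        rfl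
      · have ht := inter_ne_nil_of_hit tags 3 aS3 (by omega) rfl (by exact_mod_cast hex)
        have hf0 := inter_nil_of_min tags 3 0 aS0 (by omega) rfl (by norm_num) hmin
        have hf1 := inter_nil_of_min tags 3 1 aS1 (by omega) rfl (by norm_num) hmin
        have hf2 := inter_nil_of_min tags 3 2 aS2 (by omega) rfl (by norm_num) hmin
        simp [detect_topic_from_tags, detect_topic_from_tags_alt, h, hres, COUNTING_TAGS, ht, hf0, hf1, hf2, CATEGORIES, PySem.List.pyGet?]
        rfl
      · have ht := inter_ne_nil_of_hit tags 4 aS4 (by omega) rfl (by exact_mod_cast hex)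
        have hf0 := inter_nil_of_min tags 4 0 aS0 (by omega) rfl (by norm_num) hmin
        have hf1 := inter_nil_of_min tags 4 1 aS1 (by omega) rfl (by norm_num) hmin
        have hf2 := inter_nil_of_min tags 4 2 aS2 (by omega) rfl (by norm_num) hmin
        have hf3 := inter_nil_of_min tags 4 3 aS3 (by omega) rfl (by norm_num) hmin
        simp [detect_topic_from_tags, detect_topic_from_tags_alt, h, hres, COUNTING_TAGS, ht, hf0, hf1, hf2, hf3, CATEGORIES, PySem.List.pyGet?]
        rfl
      · have ht := inter_ne_nil_of_hit tags 5 aS5 (by omega) rfl (by exact_mod_cast hex)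
        have hf0 := inter_nil_of_min tags 5 0 aS0 (by omega) rfl (by norm_num) hmin
        have hf1 := inter_nil_of_min tags 5 1 aS1 (by omega) rfl (by norm_num) hmin
        have hf2 := inter_nil_of_min tags 5 2 aS2 (by omega) rfl (by norm_num) hmin
        have hf3 := inter_nil_of_min tags 5 3 aS3 (by omega) rfl (by norm_num) hmin
        have hf4 := inter_nil_of_min tags 5 4 aS4 (by omega) rfl (by norm_num) hmin
        simp [detect_topic_from_tags, detect_topic_from_tags_alt, h, hres, COUNTING_TAGS, ht, hf0, hf1, hf2, hf3, hf4, CATEGORIES, PySem.List.pyGet?]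
        rfl
      · have ht := inter_ne_nil_of_hit tags 6 aS6 (by omega) rfl (by exact_mod_cast hex)
        have hf0 := inter_nil_of_min tags 6 0 aS0 (by omega) rfl (by norm_num) hmin
        have hf1 := inter_nil_of_min tags 6 1 aS1 (by omega) rfl (by norm_num) hmin
        have hf2 := inter_nil_of_min tags 6 2 aS2 (by omega) rfl (by norm_num) hmin
        have hf3 := inter_nil_of_min tags 6 3 aS3 (by omega) rfl (by norm_num) hmin
        have hf4 := inter_nil_of_min tags 6 4 aS4 (by omega) rfl (by norm_num) hmin
        have hf5 := inter_nil_of_min tags 6 5 aS5 (by omega) rfl (by norm_num) hmin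
        simp [detect_topic_from_tags, detect_topic_from_tags_alt, h, hres, COUNTING_TAGS, ht, hf0, hf1, hf2, hf3, hf4, hf5, CATEGORIES, PySem.List.pyGet?]
        rfl
      · have ht := inter_ne_nil_of_hit tags 7 aS7 (by omega) rfl (by exact_mod_cast hex)
        have hf0 := inter_nil_of_min tags 7 0 aS0 (by omega) rfl (by norm_num) hmin
        have hf1 := inter_nil_of_min tags 7 1 aS1 (by omega) rfl (by norm_num) hmin
        have hf2 := inter_nil_of_min tags 7 2 aS2 (by omega) rfl (by norm_num) hmin
        have hf3 := inter_nil_of_min tags 7 3 aS3 (by omega) rfl (by norm_num) hmin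
        have hf4 := inter_nil_of_min tags 7 4 aS4 (by omega) rfl (by norm_num) hmin
        have hf5 := inter_nil_of_min tags 7 5 aS5 (by omega) rfl (by norm_num) hmin
        have hf6 := inter_nil_of_min tags 7 6 aS6 (by omega) rfl (by norm_num) hmin
        simp [detect_topic_from_tags, detect_topic_from_tags_alt, h, hres, COUNTING_TAGS, ht, hf0, hf1, hf2, hf3, hf4, hf5, hf6, CATEGORIES, PySem.List.pyGet?]
        rfl
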